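-- pv_equiv track=rewrite | github.com/pexley-math/oeis-A278299 | code/solver-a278299.py | format_grid_art
-- ===== SOURCE A (Python) =====
-- def format_grid_art(coloring):
--     """Format a solution as a simple letter grid."""
--     if not coloring:
--         return ""
--     chars = "ABCDEFGHIJKLMNOPQRSTUVWXYZabcdefghijklmnopqrstuvwxyz0123456789"
--     min_r = min(r for r, _ in coloring)
--     max_r = max(r for r, _ in coloring)
--     min_c = min(c for _, c in coloring)
--     max_c = max(c for _, c in coloring)
--     lines = []
--     for r in range(min_r, max_r + 1):
--         row = ""
--         for c in range(min_c, max_c + 1):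
--             if (r, c) in coloring:
--                 row += f" {chars[coloring[(r, c)]]}"
--             else:
--                 row += " ."
--         lines.append(f"    {row}")
--     return "\n".join(lines)
-- ===== SOURCE B (Python) =====
-- def format_grid_art(coloring):
--     """Format a solution as a simple letter grid (scatter into a preallocated grid)."""
--     if not coloring:
--         return ""
--     chars = "ABCDEFGHIJKLMNOPQRSTUVWXYZabcdefghijklmnopqrstuvwxyz0123456789"
--     rows = [r for r, _ in coloring]
--     cols = [c for _, c in coloring]
--     min_r, max_r = min(rows), max(rows)
--     min_c, max_c = min(cols), max(cols)
--     grid = [[" ."] * (max_c - min_c + 1) for _ in range(max_r - min_r + 1)]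
--     for (r, c), v in coloring.items():
--         grid[r - min_r][c - min_c] = f" {chars[v]}"
--     return "\n".join("    " + "".join(row) for row in grid)
-- ===== Notes on version B (the rewrite author's own statement) =====
-- stated objective: alternative
-- what changed: A gathers: it scans every cell of the bounding box and looks each (r,c) up in the dict; B scatters: it preallocates a ' .'-filled 2D grid and writes each dict entry once into its cell, then joins the rows.
import Mathlib
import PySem

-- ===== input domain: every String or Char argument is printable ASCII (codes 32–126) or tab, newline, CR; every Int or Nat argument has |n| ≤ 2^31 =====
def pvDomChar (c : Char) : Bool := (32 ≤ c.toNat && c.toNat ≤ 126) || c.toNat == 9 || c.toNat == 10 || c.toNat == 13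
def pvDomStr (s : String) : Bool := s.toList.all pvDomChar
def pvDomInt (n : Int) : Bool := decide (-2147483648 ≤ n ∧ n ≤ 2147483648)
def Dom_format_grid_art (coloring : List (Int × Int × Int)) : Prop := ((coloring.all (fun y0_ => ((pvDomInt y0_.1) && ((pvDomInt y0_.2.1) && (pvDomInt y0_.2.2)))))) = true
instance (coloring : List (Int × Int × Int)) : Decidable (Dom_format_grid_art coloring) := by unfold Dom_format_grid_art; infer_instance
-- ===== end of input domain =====

-- ===== PORT A =====
-- B replaces A's gather (scan every bounding-box cell and look its key up in the dict) by a
-- scatter (preallocate a " ."-filled grid, write each dict entry into its cell); return value only.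

-- The character palette both versions index (Python's `chars`).
def pvChars : String := "ABCDEFGHIJKLMNOPQRSTUVWXYZabcdefghijklmnopqrstuvwxyz0123456789"

-- min(r for r, _ in coloring), max(...), min(c ...), max(c ...) — shared by both ports.
def pvMinR (coloring : List (Int × Int × Int)) : Int :=
  (PySem.List.min? (coloring.map (fun t => t.1)) (fun x => x)).getD 0
def pvMaxR (coloring : List (Int × Int × Int)) : Int :=
  (PySem.List.max? (coloring.map (fun t => t.1)) (fun x => x)).getD 0
def pvMinC (coloring : List (Int × Int × Int)) : Int :=
  (PySem.List.min? (coloring.map (fun t => t.2.1)) (fun x => x)).getD 0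
def pvMaxC (coloring : List (Int × Int × Int)) : Int :=
  (PySem.List.max? (coloring.map (fun t => t.2.1)) (fun x => x)).getD 0

-- A's cell: `(r, c) in coloring` then `chars[coloring[(r, c)]]` (dict lookup = first match).
-- `.getD ' '` is never reached under Pre_ (Python's chars[v] raises unless -62 ≤ v < 62).
def pvCellA (coloring : List (Int × Int × Int)) (r c : Int) : String :=
  match coloring.find? (fun t => t.1 == r && t.2.1 == c) with
  | some t => " " ++ String.singleton ((PySem.Str.pyGet? pvChars t.2.2).getD ' ')
  | none => " ."

def format_grid_art (coloring : List (Int × Int × Int)) : String :=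
  if coloring = [] then ""
  else String.intercalate "\n"
    ((PySem.List.pyRange (pvMinR coloring) (pvMaxR coloring + 1) 1).foldl
      (fun lines r => lines ++
        ["    " ++ (PySem.List.pyRange (pvMinC coloring) (pvMaxC coloring + 1) 1).foldl
          (fun row c => row ++ pvCellA coloring r c) ""]) [])

-- ===== PORT B =====
-- B's cell string f" {chars[v]}" (same palette; `.getD ' '` unreached under Pre_).
def pvCellB (v : Int) : String :=
  " " ++ String.singleton ((PySem.Str.pyGet? pvChars v).getD ' ')

def format_grid_art_alt (coloring : List (Int × Int × Int)) : String :=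
  if coloring = [] then ""
  else String.intercalate "\n"
    ((coloring.foldl
        (fun g t => g.modify (t.1 - pvMinR coloring).toNat
          (fun row => row.set (t.2.1 - pvMinC coloring).toNat (pvCellB t.2.2)))
        (List.replicate (pvMaxR coloring - pvMinR coloring + 1).toNat
          (List.replicate (pvMaxC coloring - pvMinC coloring + 1).toNat " ."))).map
      (fun row => "    " ++ String.join row))

-- ===== PRECONDITION & SPEC =====
-- Pre_ excludes (a) association lists with duplicate (r, c) keys, on which the dict's
-- first-vs-last entry choice is accidental, and (b) entries whose value v lies outside
-- -62 ≤ v < 62, on which Python's chars[v] raises IndexError.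
def Pre_format_grid_art (coloring : List (Int × Int × Int)) : Prop :=
  (coloring.map (fun t => (t.1, t.2.1))).Nodup ∧ ∀ t ∈ coloring, -62 ≤ t.2.2 ∧ t.2.2 < 62
instance (coloring : List (Int × Int × Int)) : Decidable (Pre_format_grid_art coloring) := by
  unfold Pre_format_grid_art; infer_instance

def pvWitness_format_grid_art : (List (Int × Int × Int)) := [(0, 0, 0), (1, 2, 27)]

def Spec_format_grid_art (coloring : List (Int × Int × Int)) (out : String) : Prop := out = format_grid_art_alt coloring
instance (coloring : List (Int × Int × Int)) (out : String) : Decidable (Spec_format_grid_art coloring out) := by unfold Spec_format_grid_art; infer_instance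

-- ===== CLAIM (what is proved, stated in full; the proofs are below) =====
def Claim_equal_format_grid_art : Prop := ∀ (coloring : List (Int × Int × Int)), Dom_format_grid_art coloring → Pre_format_grid_art coloring → Spec_format_grid_art coloring (format_grid_art coloring)

-- ===== LEMMAS AND PROOFS =====

-- Bounds given by min/max over a nonempty coloring.
theorem pvMinR_le (coloring : List (Int × Int × Int)) (hne : coloring ≠ []) :
    ∀ t ∈ coloring, pvMinR coloring ≤ t.1 := by
  intro t ht
  cases h : PySem.List.min? (coloring.map (fun t => t.1)) (fun x => x) with
  | none => exact absurd ((PySem.List.min?_eq_none_iff _ _).mp h) (by simp [hne])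
  | some m =>
      have := PySem.List.min?_isMin h t.1 (List.mem_map_of_mem ht)
      simpa [pvMinR, h] using this

theorem pvMaxR_ge (coloring : List (Int × Int × Int)) (hne : coloring ≠ []) :
    ∀ t ∈ coloring, t.1 ≤ pvMaxR coloring := by
  intro t ht
  cases h : PySem.List.max? (coloring.map (fun t => t.1)) (fun x => x) with
  | none => exact absurd ((PySem.List.max?_eq_none_iff _ _).mp h) (by simp [hne])
  | some m =>
      have := PySem.List.max?_isMax h t.1 (List.mem_map_of_mem ht)
      simpa [pvMaxR, h] using this

theorem pvMinC_le (coloring : List (Int × Int × Int)) (hne : coloring ≠ []) :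
    ∀ t ∈ coloring, pvMinC coloring ≤ t.2.1 := by
  intro t ht
  cases h : PySem.List.min? (coloring.map (fun t => t.2.1)) (fun x => x) with
  | none => exact absurd ((PySem.List.min?_eq_none_iff _ _).mp h) (by simp [hne])
  | some m =>
      have := PySem.List.min?_isMin h t.2.1 (List.mem_map_of_mem ht)
      simpa [pvMinC, h] using this

theorem pvMaxC_ge (coloring : List (Int × Int × Int)) (hne : coloring ≠ []) :
    ∀ t ∈ coloring, t.2.1 ≤ pvMaxC coloring := by
  intro t ht
  cases h : PySem.List.max? (coloring.map (fun t => t.2.1)) (fun x => x) with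
  | none => exact absurd ((PySem.List.max?_eq_none_iff _ _).mp h) (by simp [hne])
  | some m =>
      have := PySem.List.max?_isMax h t.2.1 (List.mem_map_of_mem ht)
      simpa [pvMaxC, h] using this

-- Accumulating `row += cell` is the join of the cells.
theorem pvJoinFold (l : List String) (s : String) :
    l.foldl (fun r x => r ++ x) s = s ++ String.join l := by
  induction l generalizing s with
  | nil => simp [String.join]
  | cons a l ih =>
      rw [List.foldl_cons, ih (s ++ a)]
      have h2 : String.join (a :: l) = ("" ++ a) ++ String.join l := by
        rw [String.join, List.foldl_cons, ih ("" ++ a)]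
      rw [h2]
      simp [String.append_assoc]

theorem pvFoldlStr {α : Type} (f : α → String) (l : List α) (s : String) :
    l.foldl (fun acc x => acc ++ f x) s = s ++ String.join (l.map f) := by
  rw [← List.foldl_map (f := f) (g := fun r x => r ++ x), pvJoinFold]

-- The value B's scatter fold leaves at cell (i, j), read with " ." as the out-of-grid default.
def pvAt (g : List (List String)) (i j : Nat) : String :=
  ((g[i]?.getD [])[j]?.getD " .")

-- One scatter step: the state transformer of B's loop over the entries.
def pvStep (min_r min_c : Int) (g : List (List String)) (t : Int × Int × Int) :
    List (List String) :=
  g.modify (t.1 - min_r).toNat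
    (fun row => row.set (t.2.1 - min_c).toNat (pvCellB t.2.2))

theorem pvStep_length (min_r min_c : Int) (g : List (List String)) (t : Int × Int × Int) :
    (pvStep min_r min_c g t).length = g.length := by
  simp [pvStep]

theorem pvStep_rect (min_r min_c : Int) (w : Nat) (g : List (List String))
    (t : Int × Int × Int) (hg : ∀ (k : Nat) (row : List String), g[k]? = some row → row.length = w) :
    ∀ (k : Nat) (row : List String), (pvStep min_r min_c g t)[k]? = some row → row.length = w := by
  intro k row h
  cases hk : g[k]? with
  | none => rw [pvStep, List.getElem?_modify, hk] at h; simp at h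
  | some r0 =>
      rw [pvStep, List.getElem?_modify, hk] at h
      simp only [Option.map_eq_map, Option.map_some, Option.some.injEq] at h
      subst row
      split <;> simp [List.length_set, hg k r0 hk]

theorem pvFold_length (min_r min_c : Int) (l : List (Int × Int × Int)) :
    ∀ g : List (List String), (l.foldl (pvStep min_r min_c) g).length = g.length := by
  induction l with
  | nil => intro g; rfl
  | cons a l ih => intro g; rw [List.foldl_cons, ih, pvStep_length]

theorem pvFold_rect (min_r min_c : Int) (w : Nat) (l : List (Int × Int × Int)) :
    ∀ g : List (List String), (∀ (k : Nat) (row : List String), g[k]? = some row → row.length = w) →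
    ∀ (k : Nat) (row : List String), (l.foldl (pvStep min_r min_c) g)[k]? = some row → row.length = w := by
  induction l with
  | nil => intro g hg; exact hg
  | cons a l ih => intro g hg; exact ih _ (pvStep_rect min_r min_c w g a hg)

theorem pvScatterAt (min_r min_c : Int) (w : Nat) :
    ∀ (l : List (Int × Int × Int)) (g : List (List String)),
    (l.map (fun t => (t.1, t.2.1))).Nodup →
    (∀ (k : Nat) (row : List String), g[k]? = some row → row.length = w) →
    (∀ t ∈ l, min_r ≤ t.1 ∧ (t.1 - min_r).toNat < g.length ∧
              min_c ≤ t.2.1 ∧ (t.2.1 - min_c).toNat < w) →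
    ∀ i j : Nat,
      pvAt (l.foldl (pvStep min_r min_c) g) i j =
        match l.find? (fun t => t.1 == min_r + (i : Int) && t.2.1 == min_c + (j : Int)) with
        | some t => pvCellB t.2.2
        | none => pvAt g i j := by
  intro l
  induction l with
  | nil => intro g _ _ _ i j; simp
  | cons a l ih =>
      intro g hnd hg hbox i j
      have hnd' : (l.map (fun t => (t.1, t.2.1))).Nodup := (List.nodup_cons.mp hnd).2
      have hkey : (a.1, a.2.1) ∉ l.map (fun t => (t.1, t.2.1)) := (List.nodup_cons.mp hnd).1
      have hba := hbox a (List.mem_cons_self)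
      have hg' : ∀ (k : Nat) (row : List String), (pvStep min_r min_c g a)[k]? = some row → row.length = w :=
        pvStep_rect min_r min_c w g a hg
      have hbox' : ∀ t ∈ l, min_r ≤ t.1 ∧ (t.1 - min_r).toNat < (pvStep min_r min_c g a).length ∧
          min_c ≤ t.2.1 ∧ (t.2.1 - min_c).toNat < w := by
        intro t ht
        have := hbox t (List.mem_cons_of_mem _ ht)
        simpa [pvStep_length] using this
      rw [List.foldl_cons, ih (pvStep min_r min_c g a) hnd' hg' hbox' i j]
      by_cases hpa : a.1 = min_r + (i : Int) ∧ a.2.1 = min_c + (j : Int)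
      · -- the head entry owns cell (i, j)
        have hfind : l.find? (fun t => t.1 == min_r + (i : Int) && t.2.1 == min_c + (j : Int)) = none := by
          rw [List.find?_eq_none]
          intro t ht hmatch
          simp only [Bool.and_eq_true, beq_iff_eq] at hmatch
          exact hkey (by
            rw [← hpa.1, ← hpa.2] at hmatch
            exact (hmatch.1 ▸ hmatch.2 ▸ List.mem_map_of_mem (f := fun t => (t.1, t.2.1)) ht))
        have hi : (a.1 - min_r).toNat = i := by omega
        have hj : (a.2.1 - min_c).toNat = j := by omega
        have : (fun t : Int × Int × Int => t.1 == min_r + (i : Int) && t.2.1 == min_c + (j : Int)) a = true := by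
          simp [hpa.1, hpa.2]
        rw [List.find?_cons_of_pos (p := fun t : Int × Int × Int => t.1 == min_r + (i : Int) && t.2.1 == min_c + (j : Int)) this, hfind]
        -- now compute pvAt (pvStep g a) i j = pvCellB a.2.2
        have hilen : i < g.length := hi ▸ hba.2.1
        cases hrow : g[i]? with
        | none => exact absurd (List.getElem?_eq_some_iff.mpr ⟨hilen, rfl⟩) (by simp [hrow])
        | some row =>
            have hjw : j < row.length := by rw [hg i row hrow]; exact hj ▸ hba.2.2.2
            simp [pvAt, pvStep, hrow, hi, hj, hjw]
      · -- the head entry writes some other cell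
        have : (fun t : Int × Int × Int => t.1 == min_r + (i : Int) && t.2.1 == min_c + (j : Int)) a = false := by
          simp only [Bool.and_eq_false_iff, beq_eq_false_iff_ne, ne_eq]
          by_cases h1 : a.1 = min_r + (i : Int)
          · exact Or.inr (fun h2 => hpa ⟨h1, h2⟩)
          · exact Or.inl h1
        rw [List.find?_cons_of_neg (p := fun t : Int × Int × Int => t.1 == min_r + (i : Int) && t.2.1 == min_c + (j : Int)) (by simp [this])]
        cases hfnd : l.find? (fun t => t.1 == min_r + (i : Int) && t.2.1 == min_c + (j : Int)) with
        | some t => rfl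
        | none =>
            -- pvAt (pvStep g a) i j = pvAt g i j : a's target cell differs from (i, j)
            simp only
            rw [pvAt, pvStep, List.getElem?_modify]
            by_cases hi : (a.1 - min_r).toNat = i
            · have hj : (a.2.1 - min_c).toNat ≠ j := by
                intro hj
                exact hpa ⟨by omega, by omega⟩
              cases hrow : g[i]? with
              | none => simp [pvAt, hrow, hi]
              | some row => simp [pvAt, hrow, hi, hj]
            · cases hrow : g[i]? with
              | none => simp [pvAt, hrow, hi]
              | some row => simp [pvAt, hrow, hi]

-- The grid B's scatter loop produces is row-by-row what A's gather computes.
theorem pvMain (coloring : List (Int × Int × Int))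
    (hnd : (coloring.map (fun t => (t.1, t.2.1))).Nodup) (hne : coloring ≠ []) :
    format_grid_art coloring = format_grid_art_alt coloring := by
  rw [format_grid_art, format_grid_art_alt, if_neg hne, if_neg hne]
  congr 1
  have hstep : (fun (g : List (List String)) (t : Int × Int × Int) =>
      g.modify (t.1 - pvMinR coloring).toNat
        (fun row => row.set (t.2.1 - pvMinC coloring).toNat (pvCellB t.2.2)))
      = pvStep (pvMinR coloring) (pvMinC coloring) := rfl
  rw [hstep]
  set mR := pvMinR coloring with hmR
  set MR := pvMaxR coloring with hMR
  set mC := pvMinC coloring with hmC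
  set MC := pvMaxC coloring with hMC
  set hh := (MR - mR + 1).toNat with hhh
  set w := (MC - mC + 1).toNat with hww
  set grid0 : List (List String) := List.replicate hh (List.replicate w " .") with hgrid0
  set grid := coloring.foldl (pvStep mR mC) grid0 with hgridDef
  clear_value grid grid0 w hh MC mC MR mR
  have hrect0 : ∀ (k : Nat) (row : List String), grid0[k]? = some row → row.length = w := by
    intro k row h
    rw [hgrid0, List.getElem?_replicate] at h
    split at h
    · cases h; simp
    · cases h
  have hbox : ∀ t ∈ coloring, mR ≤ t.1 ∧ (t.1 - mR).toNat < grid0.length ∧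
      mC ≤ t.2.1 ∧ (t.2.1 - mC).toNat < w := by
    intro t ht
    have h1 := pvMinR_le coloring hne t ht
    have h2 := pvMaxR_ge coloring hne t ht
    have h3 := pvMinC_le coloring hne t ht
    have h4 := pvMaxC_ge coloring hne t ht
    have h5 : grid0.length = hh := by rw [hgrid0, List.length_replicate]
    exact ⟨by omega, by omega, by omega, by omega⟩
  have hlen : grid.length = hh := by
    rw [hgridDef, pvFold_length, hgrid0, List.length_replicate]
  have hrect : ∀ (k : Nat) (row : List String), grid[k]? = some row → row.length = w :=
    hgridDef ▸ pvFold_rect mR mC w coloring grid0 hrect0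
  have hcell : ∀ i j : Nat, i < hh → j < w →
      pvAt grid i j = pvCellA coloring (mR + (i : Int)) (mC + (j : Int)) := by
    intro i j hi hj
    rw [hgridDef, pvScatterAt mR mC w coloring grid0 hnd hrect0 hbox i j]
    have h0 : pvAt grid0 i j = " ." := by
      simp [pvAt, hgrid0, hi, hj]
    rw [h0, pvCellA]
    cases List.find? (fun t => t.1 == mR + (i : Int) && t.2.1 == mC + (j : Int)) coloring <;> rfl
  -- the produced grid is exactly the table of A's cells
  have hg : grid = (PySem.List.pyRange mR (MR + 1) 1).map
      (fun r => (PySem.List.pyRange mC (MC + 1) 1).map (fun c => pvCellA coloring r c)) := by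
    apply List.ext_getElem?
    intro n
    rw [List.getElem?_map, PySem.List.getElem?_pyRange_one]
    by_cases hn : n < hh
    · rw [if_pos (by omega)]
      cases hrow : grid[n]? with
      | none => rw [List.getElem?_eq_none_iff] at hrow; omega
      | some row =>
          simp only [Option.map_some, Option.some.injEq]
          apply List.ext_getElem?
          intro k
          rw [List.getElem?_map, PySem.List.getElem?_pyRange_one]
          by_cases hk : k < w
          · rw [if_pos (by omega)]
            have : pvAt grid n k = row[k]?.getD " ." := by simp [pvAt, hrow]
            rw [hcell n k hn hk] at this
            have hkrow : k < row.length := by rw [hrect n row hrow]; exact hk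
            simp only [Option.map_some]
            rw [List.getElem?_eq_getElem hkrow]
            rw [List.getElem?_eq_getElem hkrow, Option.getD_some] at this
            exact (congrArg some this.symm)
          · rw [if_neg (by omega)]
            simp only [Option.map_none]
            rw [List.getElem?_eq_none_iff]
            rw [hrect n row hrow]; omega
    · rw [if_neg (by omega)]
      simp only [Option.map_none]
      rw [List.getElem?_eq_none_iff, hlen]; omega
  rw [hg, List.map_map]
  rw [PySem.List.foldl_append_singleton_eq_map
      (f := fun r => "    " ++ (PySem.List.pyRange mC (MC + 1) 1).foldl
        (fun row c => row ++ pvCellA coloring r c) ""), List.nil_append]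
  apply List.map_congr_left
  intro r _
  simp only [Function.comp_apply, pvFoldlStr]
  rw [show ("" : String) ++ String.join ((PySem.List.pyRange mC (MC + 1) 1).map (fun c => pvCellA coloring r c)) = String.join ((PySem.List.pyRange mC (MC + 1) 1).map (fun c => pvCellA coloring r c)) by simp]

-- ===== VERDICT (by name: the statement is the Claim_ definition above) =====
theorem format_grid_art_spec : Claim_equal_format_grid_art := by
  intro coloring _hdom hpre
  unfold Spec_format_grid_art
  by_cases hne : coloring = []
  · subst hne; rfl
  · exact pvMain coloring hpre.1 hne
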